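-- pv_equiv track=rewrite | github.com/shivammehta25/Fun-Coding | AdventOfCode2024/Day14/solution.py | compute_quadrant_sum
-- ===== SOURCE A (Python) =====
-- def compute_quadrant_sum(grid):
--     n = len(grid)
--     m = len(grid[0])
--
--     quadrants = {1: 0, 2: 0, 3: 0, 4: 0}
--
--     for i in range(n):
--         for j in range(m):
--             if i == n // 2 or j == m // 2:
--                 continue
--
--             if i < n // 2 and j < m // 2:
--                 quadrant = 1
--             elif i > n // 2 and j < m // 2:
--                 quadrant = 3
--             elif i < n // 2 and j > m // 2:
--                 quadrant = 2
--             else: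
--                 quadrant = 4
--
--             quadrants[quadrant] += grid[i][j]
--
--     ans = 1
--
--     for k, v in quadrants.items():
--         ans *= v
--
--     return ans
-- ===== SOURCE B (Python) =====
-- def compute_quadrant_sum(grid):
--     n = len(grid)
--     m = len(grid[0])
--     t, l = n // 2, m // 2
--     top, bottom = grid[:t], grid[t + 1:]
--     tl = sum(sum(row[:l]) for row in top)
--     tr = sum(sum(row[l + 1:m]) for row in top)
--     bl = sum(sum(row[:l]) for row in bottom)
--     br = sum(sum(row[l + 1:m]) for row in bottom)
--     return tl * tr * bl * br
-- ===== Notes on version B (the rewrite author's own statement) =====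
-- stated objective: simpler
-- what changed: Replaces A's single sweep that classifies every cell with a dict of quadrant counters, a middle-skip guard and a four-way branch chain by four direct region sums over row-range and column slices multiplied together; the C-level slice/sum also makes it measurably faster (constant factor).
-- outside the precondition, e.g. on compute_quadrant_sum([]): A raises IndexError, B raises IndexError
import Mathlib
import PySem

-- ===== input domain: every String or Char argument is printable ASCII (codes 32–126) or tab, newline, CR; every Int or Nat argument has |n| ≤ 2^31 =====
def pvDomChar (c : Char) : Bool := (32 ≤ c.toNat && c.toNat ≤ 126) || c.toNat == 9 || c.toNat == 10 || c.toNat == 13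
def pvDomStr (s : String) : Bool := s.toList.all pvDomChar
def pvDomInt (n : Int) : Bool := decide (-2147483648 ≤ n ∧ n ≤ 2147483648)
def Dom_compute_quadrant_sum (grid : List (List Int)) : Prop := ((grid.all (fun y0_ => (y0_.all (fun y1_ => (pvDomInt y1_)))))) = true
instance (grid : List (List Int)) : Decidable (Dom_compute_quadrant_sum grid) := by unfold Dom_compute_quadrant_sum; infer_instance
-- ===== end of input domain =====

-- B replaces A's per-cell quadrant classification (dict + branch chain + middle-skip guard)
-- by four direct region sums over row/column slices; objective: simpler.


-- ===== PORT A =====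
-- grid[i][j] is ported with pyGetD (total); Pre_ below admits exactly the inputs on which
-- every access is in range (and grid ≠ []), i.e. exactly where the Python A returns.
-- quadrants[quadrant] += x is insert quadrant (getD quadrant 0 + x): keys 1–4 are always present.

def compute_quadrant_sum (grid : List (List Int)) : Int :=
  let n : Int := grid.length
  let m : Int := (PySem.List.pyGetD grid 0 []).length
  let quadrants : PySem.Dict Int Int := PySem.Dict.ofList [(1, 0), (2, 0), (3, 0), (4, 0)]
  let quadrants := (PySem.List.pyRange 0 n 1).foldl (fun q i =>
    (PySem.List.pyRange 0 m 1).foldl (fun q j =>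
      if i = PySem.Int.floordiv n 2 ∨ j = PySem.Int.floordiv m 2 then q
      else
        let quadrant : Int :=
          if i < PySem.Int.floordiv n 2 ∧ j < PySem.Int.floordiv m 2 then 1
          else if i > PySem.Int.floordiv n 2 ∧ j < PySem.Int.floordiv m 2 then 3
          else if i < PySem.Int.floordiv n 2 ∧ j > PySem.Int.floordiv m 2 then 2
          else 4
        q.insert quadrant (q.getD quadrant 0 +
          PySem.List.pyGetD (PySem.List.pyGetD grid i []) j 0)) q) quadrants
  quadrants.items.foldl (fun ans kv => ans * kv.2) 1

-- ===== PORT B =====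
def compute_quadrant_sum_alt (grid : List (List Int)) : Int :=
  let n : Int := grid.length
  let m : Int := (PySem.List.pyGetD grid 0 []).length
  let t := PySem.Int.floordiv n 2
  let l := PySem.Int.floordiv m 2
  let top := PySem.List.slice grid none (some t)
  let bottom := PySem.List.slice grid (some (t + 1)) none
  let tl := (top.map (fun row => (PySem.List.slice row none (some l)).sum)).sum
  let tr := (top.map (fun row => (PySem.List.slice row (some (l + 1)) (some m)).sum)).sum
  let bl := (bottom.map (fun row => (PySem.List.slice row none (some l)).sum)).sum
  let br := (bottom.map (fun row => (PySem.List.slice row (some (l + 1)) (some m)).sum)).sum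
  tl * tr * bl * br

-- ===== PRECONDITION & SPEC =====
-- Pre_ holds exactly where the Python A returns normally: grid nonempty (grid[0] raises
-- IndexError on []) and every accessed cell grid[i][j] (i ≠ n//2, j ≠ m//2) in range of its row.
def Pre_compute_quadrant_sum (grid : List (List Int)) : Prop :=
  grid ≠ [] ∧
    ∀ i < grid.length, i ≠ grid.length / 2 →
      ∀ j < (grid.getD 0 []).length, j ≠ (grid.getD 0 []).length / 2 → j < (grid.getD i []).length
instance (grid : List (List Int)) : Decidable (Pre_compute_quadrant_sum grid) := by
  unfold Pre_compute_quadrant_sum; infer_instance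
def pvWitness_compute_quadrant_sum : List (List Int) := [[1, 2], [3, 4]]

def Spec_compute_quadrant_sum (grid : List (List Int)) (out : Int) : Prop := out = compute_quadrant_sum_alt grid
instance (grid : List (List Int)) (out : Int) : Decidable (Spec_compute_quadrant_sum grid out) := by unfold Spec_compute_quadrant_sum; infer_instance

-- ===== CLAIM (what is proved, stated in full; the proofs are below) =====
def Claim_equal_compute_quadrant_sum : Prop := ∀ (grid : List (List Int)), Dom_compute_quadrant_sum grid → Pre_compute_quadrant_sum grid → Spec_compute_quadrant_sum grid (compute_quadrant_sum grid)

-- ===== LEMMAS AND PROOFS =====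

def pvQd (a b c d : Int) : PySem.Dict Int Int := PySem.Dict.ofList [(1, a), (2, b), (3, c), (4, d)]
def pvN (grid : List (List Int)) : Int := grid.length
def pvM (grid : List (List Int)) : Int := (PySem.List.pyGetD grid 0 []).length
def pvT (grid : List (List Int)) : Int := PySem.Int.floordiv (pvN grid) 2
def pvL (grid : List (List Int)) : Int := PySem.Int.floordiv (pvM grid) 2
def pvCell (grid : List (List Int)) (i j : Int) : Int :=
  PySem.List.pyGetD (PySem.List.pyGetD grid i []) j 0
def pvCol (grid : List (List Int)) (i ca cb : Int) : Int :=
  ((PySem.List.pyRange ca cb 1).map (pvCell grid i)).sum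
def pvQuad (grid : List (List Int)) (ra rb ca cb : Int) : Int :=
  ((PySem.List.pyRange ra rb 1).map (fun i => pvCol grid i ca cb)).sum
def pvBody (grid : List (List Int)) (i : Int) (q : PySem.Dict Int Int) (j : Int) : PySem.Dict Int Int :=
  if i = PySem.Int.floordiv (pvN grid) 2 ∨ j = PySem.Int.floordiv (pvM grid) 2 then q
  else
    let quadrant : Int :=
      if i < PySem.Int.floordiv (pvN grid) 2 ∧ j < PySem.Int.floordiv (pvM grid) 2 then 1
      else if i > PySem.Int.floordiv (pvN grid) 2 ∧ j < PySem.Int.floordiv (pvM grid) 2 then 3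
      else if i < PySem.Int.floordiv (pvN grid) 2 ∧ j > PySem.Int.floordiv (pvM grid) 2 then 2
      else 4
    q.insert quadrant (q.getD quadrant 0 + pvCell grid i j)

lemma A_unfold (grid : List (List Int)) :
    compute_quadrant_sum grid =
      ((PySem.List.pyRange 0 (pvN grid) 1).foldl
        (fun q i => (PySem.List.pyRange 0 (pvM grid) 1).foldl (pvBody grid i) q)
        (pvQd 0 0 0 0)).items.foldl (fun ans kv => ans * kv.2) 1 := rfl

lemma foldl_key1 (f : Int → Int) (L : List Int) (a b c d : Int) :
    L.foldl (fun q j => q.insert 1 (q.getD 1 0 + f j)) (pvQd a b c d)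
      = pvQd (a + (L.map f).sum) b c d := by
  induction L generalizing a with
  | nil => simp
  | cons x xs ih =>
    have h1 : (pvQd a b c d).insert 1 ((pvQd a b c d).getD 1 0 + f x) = pvQd (a + f x) b c d := rfl
    simp only [List.foldl_cons, h1, ih, List.map_cons, List.sum_cons, add_assoc]

lemma foldl_key2 (f : Int → Int) (L : List Int) (a b c d : Int) :
    L.foldl (fun q j => q.insert 2 (q.getD 2 0 + f j)) (pvQd a b c d)
      = pvQd a (b + (L.map f).sum) c d := by
  induction L generalizing b with
  | nil => simp
  | cons x xs ih =>
    have h1 : (pvQd a b c d).insert 2 ((pvQd a b c d).getD 2 0 + f x) = pvQd a (b + f x) c d := rfl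
    simp only [List.foldl_cons, h1, ih, List.map_cons, List.sum_cons, add_assoc]

lemma foldl_key3 (f : Int → Int) (L : List Int) (a b c d : Int) :
    L.foldl (fun q j => q.insert 3 (q.getD 3 0 + f j)) (pvQd a b c d)
      = pvQd a b (c + (L.map f).sum) d := by
  induction L generalizing c with
  | nil => simp
  | cons x xs ih =>
    have h1 : (pvQd a b c d).insert 3 ((pvQd a b c d).getD 3 0 + f x) = pvQd a b (c + f x) d := rfl
    simp only [List.foldl_cons, h1, ih, List.map_cons, List.sum_cons, add_assoc]

lemma foldl_key4 (f : Int → Int) (L : List Int) (a b c d : Int) :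
    L.foldl (fun q j => q.insert 4 (q.getD 4 0 + f j)) (pvQd a b c d)
      = pvQd a b c (d + (L.map f).sum) := by
  induction L generalizing d with
  | nil => simp
  | cons x xs ih =>
    have h1 : (pvQd a b c d).insert 4 ((pvQd a b c d).getD 4 0 + f x) = pvQd a b c (d + f x) := rfl
    simp only [List.foldl_cons, h1, ih, List.map_cons, List.sum_cons, add_assoc]

lemma pvM_nonneg (grid : List (List Int)) : 0 ≤ pvM grid := by
  unfold pvM; positivity

lemma pvL_nonneg (grid : List (List Int)) : 0 ≤ pvL grid := by
  unfold pvL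
  exact (PySem.Int.le_floordiv_iff_mul_le (by norm_num)).mpr (by simpa using pvM_nonneg grid)

lemma pvL_lt (grid : List (List Int)) (h : 0 < pvM grid) : pvL grid < pvM grid := by
  unfold pvL
  exact (PySem.Int.floordiv_lt_iff_lt_mul (by norm_num)).mpr (by omega)

lemma rowTop (grid : List (List Int)) (i a b c d : Int) (hi : i < pvT grid) :
    (PySem.List.pyRange 0 (pvM grid) 1).foldl (pvBody grid i) (pvQd a b c d)
      = pvQd (a + pvCol grid i 0 (pvL grid)) (b + pvCol grid i (pvL grid + 1) (pvM grid)) c d := by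
  by_cases hm : pvM grid ≤ 0
  · have h0 : pvM grid = 0 := le_antisymm hm (pvM_nonneg grid)
    have hl : pvL grid = 0 := by unfold pvL; rw [h0]; rfl
    rw [h0, hl]
    simp [pvCol, PySem.List.pyRange_one_eq_nil (le_refl (0:Int)),
      PySem.List.pyRange_one_eq_nil (by norm_num : (0:Int) ≤ 1)]
  · have hm' : 0 < pvM grid := by omega
    have hl0 : 0 ≤ pvL grid := pvL_nonneg grid
    have hlm : pvL grid < pvM grid := pvL_lt grid hm'
    rw [PySem.List.pyRange_one_append 0 (pvL grid) (pvM grid) hl0 (le_of_lt hlm),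
      PySem.List.pyRange_one_cons hlm, List.foldl_append, List.foldl_cons]
    have hit : i ≠ pvT grid := ne_of_lt hi
    have hcongr1 : List.foldl (pvBody grid i) (pvQd a b c d) (PySem.List.pyRange 0 (pvL grid))
        = List.foldl (fun q j => q.insert 1 (q.getD 1 0 + pvCell grid i j)) (pvQd a b c d)
            (PySem.List.pyRange 0 (pvL grid)) := by
      apply PySem.List.foldl_congr_mem
      intro q j hj
      obtain ⟨hj0, hjl⟩ := PySem.List.mem_pyRange_one.mp hj
      have hjne : j ≠ PySem.Int.floordiv (pvM grid) 2 := by unfold pvL at hjl; omega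
      have hjlt : j < PySem.Int.floordiv (pvM grid) 2 := by unfold pvL at hjl; omega
      simp only [pvBody, pvT, pvL] at *
      rw [if_neg (by omega), if_pos ⟨hi, hjlt⟩]
    rw [hcongr1, foldl_key1,
      show (List.map (pvCell grid i) (PySem.List.pyRange 0 (pvL grid))).sum
        = pvCol grid i 0 (pvL grid) from rfl]
    have hmid : pvBody grid i (pvQd (a + pvCol grid i 0 (pvL grid)) b c d) (pvL grid)
        = pvQd (a + pvCol grid i 0 (pvL grid)) b c d := by
      simp [pvBody, pvL]
    rw [hmid]
    have hcongr2 : List.foldl (pvBody grid i) (pvQd (a + pvCol grid i 0 (pvL grid)) b c d)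
          (PySem.List.pyRange (pvL grid + 1) (pvM grid))
        = List.foldl (fun q j => q.insert 2 (q.getD 2 0 + pvCell grid i j))
            (pvQd (a + pvCol grid i 0 (pvL grid)) b c d)
            (PySem.List.pyRange (pvL grid + 1) (pvM grid)) := by
      apply PySem.List.foldl_congr_mem
      intro q j hj
      obtain ⟨hj0, hjl⟩ := PySem.List.mem_pyRange_one.mp hj
      have hjne : j ≠ PySem.Int.floordiv (pvM grid) 2 := by unfold pvL at hj0; omega
      have hjgt : j > PySem.Int.floordiv (pvM grid) 2 := by unfold pvL at hj0; omega
      simp only [pvBody, pvT, pvL] at *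
      rw [if_neg (by omega), if_neg (by omega), if_neg (by omega), if_pos ⟨hi, hjgt⟩]
    rw [hcongr2, foldl_key2]
    rfl

lemma rowBot (grid : List (List Int)) (i a b c d : Int) (hi : pvT grid < i) :
    (PySem.List.pyRange 0 (pvM grid) 1).foldl (pvBody grid i) (pvQd a b c d)
      = pvQd a b (c + pvCol grid i 0 (pvL grid)) (d + pvCol grid i (pvL grid + 1) (pvM grid)) := by
  by_cases hm : pvM grid ≤ 0
  · have h0 : pvM grid = 0 := le_antisymm hm (pvM_nonneg grid)
    have hl : pvL grid = 0 := by unfold pvL; rw [h0]; rfl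
    rw [h0, hl]
    simp [pvCol, PySem.List.pyRange_one_eq_nil (le_refl (0:Int)),
      PySem.List.pyRange_one_eq_nil (by norm_num : (0:Int) ≤ 1)]
  · have hm' : 0 < pvM grid := by omega
    have hl0 : 0 ≤ pvL grid := pvL_nonneg grid
    have hlm : pvL grid < pvM grid := pvL_lt grid hm'
    rw [PySem.List.pyRange_one_append 0 (pvL grid) (pvM grid) hl0 (le_of_lt hlm),
      PySem.List.pyRange_one_cons hlm, List.foldl_append, List.foldl_cons]
    have hit : i ≠ pvT grid := (ne_of_lt hi).symm
    have hcongr1 : List.foldl (pvBody grid i) (pvQd a b c d) (PySem.List.pyRange 0 (pvL grid))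
        = List.foldl (fun q j => q.insert 3 (q.getD 3 0 + pvCell grid i j)) (pvQd a b c d)
            (PySem.List.pyRange 0 (pvL grid)) := by
      apply PySem.List.foldl_congr_mem
      intro q j hj
      obtain ⟨hj0, hjl⟩ := PySem.List.mem_pyRange_one.mp hj
      have hjlt : j < PySem.Int.floordiv (pvM grid) 2 := by unfold pvL at hjl; omega
      simp only [pvBody, pvT, pvL] at *
      rw [if_neg (by omega), if_neg (by omega), if_pos ⟨hi, hjlt⟩]
    rw [hcongr1, foldl_key3,
      show (List.map (pvCell grid i) (PySem.List.pyRange 0 (pvL grid))).sum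
        = pvCol grid i 0 (pvL grid) from rfl]
    have hmid : pvBody grid i (pvQd a b (c + pvCol grid i 0 (pvL grid)) d) (pvL grid)
        = pvQd a b (c + pvCol grid i 0 (pvL grid)) d := by
      simp [pvBody, pvL]
    rw [hmid]
    have hcongr2 : List.foldl (pvBody grid i) (pvQd a b (c + pvCol grid i 0 (pvL grid)) d)
          (PySem.List.pyRange (pvL grid + 1) (pvM grid))
        = List.foldl (fun q j => q.insert 4 (q.getD 4 0 + pvCell grid i j))
            (pvQd a b (c + pvCol grid i 0 (pvL grid)) d)
            (PySem.List.pyRange (pvL grid + 1) (pvM grid)) := by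
      apply PySem.List.foldl_congr_mem
      intro q j hj
      obtain ⟨hj0, hjl⟩ := PySem.List.mem_pyRange_one.mp hj
      have hjgt : j > PySem.Int.floordiv (pvM grid) 2 := by unfold pvL at hj0; omega
      simp only [pvBody, pvT, pvL] at *
      rw [if_neg (by omega), if_neg (by omega), if_neg (by omega), if_neg (by omega)]
    rw [hcongr2, foldl_key4]
    rfl

lemma rowMid (grid : List (List Int)) (q : PySem.Dict Int Int) :
    (PySem.List.pyRange 0 (pvM grid) 1).foldl (pvBody grid (pvT grid)) q = q := by
  have h : List.foldl (pvBody grid (pvT grid)) q (PySem.List.pyRange 0 (pvM grid))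
      = List.foldl (fun q _ => q) q (PySem.List.pyRange 0 (pvM grid)) := by
    apply PySem.List.foldl_congr_mem
    intro q j hj
    simp [pvBody, pvT]
  rw [h]
  induction PySem.List.pyRange 0 (pvM grid) 1 <;> simp_all

lemma foldTop (grid : List (List Int)) (L : List Int) (hL : ∀ i ∈ L, i < pvT grid)
    (a b c d : Int) :
    L.foldl (fun q i => (PySem.List.pyRange 0 (pvM grid) 1).foldl (pvBody grid i) q) (pvQd a b c d)
      = pvQd (a + (L.map (fun i => pvCol grid i 0 (pvL grid))).sum)
          (b + (L.map (fun i => pvCol grid i (pvL grid + 1) (pvM grid))).sum) c d := by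
  induction L generalizing a b with
  | nil => simp
  | cons x xs ih =>
    rw [List.foldl_cons, rowTop grid x a b c d (hL x (by simp)),
      ih (fun i hi => hL i (by simp [hi])), List.map_cons, List.map_cons,
      List.sum_cons, List.sum_cons, add_assoc, add_assoc]

lemma foldBot (grid : List (List Int)) (L : List Int) (hL : ∀ i ∈ L, pvT grid < i)
    (a b c d : Int) :
    L.foldl (fun q i => (PySem.List.pyRange 0 (pvM grid) 1).foldl (pvBody grid i) q) (pvQd a b c d)
      = pvQd a b (c + (L.map (fun i => pvCol grid i 0 (pvL grid))).sum)
          (d + (L.map (fun i => pvCol grid i (pvL grid + 1) (pvM grid))).sum) := by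
  induction L generalizing c d with
  | nil => simp
  | cons x xs ih =>
    rw [List.foldl_cons, rowBot grid x a b c d (hL x (by simp)),
      ih (fun i hi => hL i (by simp [hi])), List.map_cons, List.map_cons,
      List.sum_cons, List.sum_cons, add_assoc, add_assoc]

lemma pvT_nonneg (grid : List (List Int)) : 0 ≤ pvT grid := by
  unfold pvT
  exact (PySem.Int.le_floordiv_iff_mul_le (by norm_num)).mpr (by unfold pvN; positivity)

lemma pvT_lt (grid : List (List Int)) (h : grid ≠ []) : pvT grid < pvN grid := by
  have : 0 < pvN grid := by
    unfold pvN
    exact_mod_cast List.length_pos_iff.mpr h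
  unfold pvT
  exact (PySem.Int.floordiv_lt_iff_lt_mul (by norm_num)).mpr (by omega)

lemma A_eq (grid : List (List Int)) (h : grid ≠ []) :
    compute_quadrant_sum grid
      = 1 * pvQuad grid 0 (pvT grid) 0 (pvL grid)
          * pvQuad grid 0 (pvT grid) (pvL grid + 1) (pvM grid)
          * pvQuad grid (pvT grid + 1) (pvN grid) 0 (pvL grid)
          * pvQuad grid (pvT grid + 1) (pvN grid) (pvL grid + 1) (pvM grid) := by
  rw [A_unfold]
  have ht0 : 0 ≤ pvT grid := pvT_nonneg grid
  have htn : pvT grid < pvN grid := pvT_lt grid h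
  rw [PySem.List.pyRange_one_append 0 (pvT grid) (pvN grid) ht0 (le_of_lt htn),
    PySem.List.pyRange_one_cons htn, List.foldl_append, List.foldl_cons,
    foldTop grid _ (fun i hi => (PySem.List.mem_pyRange_one.mp hi).2) 0 0 0 0,
    rowMid, foldBot grid _ (fun i hi => (PySem.List.mem_pyRange_one.mp hi).1) _ _ 0 0]
  simp only [zero_add]
  rfl

lemma seg {α : Type} (xs : List α) (d : α) (a b : Int) (h0 : 0 ≤ a)
    (h : ∀ j : Int, a ≤ j → j < b → j < (xs.length : Int)) :
    (PySem.List.pyRange a b 1).map (fun j => PySem.List.pyGetD xs j d)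
      = (xs.drop a.toNat).take (b - a).toNat := by
  by_cases hba : b ≤ a
  · rw [PySem.List.pyRange_one_eq_nil hba]
    have hz : (b - a).toNat = 0 := by omega
    rw [hz]
    simp
  · have hab : a < b := by omega
    have hb : b ≤ (xs.length : Int) := by have := h (b - 1) (by omega) (by omega); omega
    apply List.ext_getElem
    · simp [PySem.List.length_pyRange_one]
      omega
    · intro k h1 h2
      have hlen : k < (b - a).toNat := by
        simpa [PySem.List.length_pyRange_one] using h1
      simp only [List.getElem_map]
      rw [PySem.List.getElem_pyRange_one]
      rw [PySem.List.pyGetD_eq_getElem xs d (by omega) (by omega)]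
      rw [List.getElem_take, List.getElem_drop]
      congr 1
      omega

lemma pvL_le (grid : List (List Int)) : pvL grid ≤ pvM grid := by
  have h2 : pvL grid * 2 ≤ pvM grid := by
    unfold pvL
    exact (PySem.Int.le_floordiv_iff_mul_le (by norm_num)).mp le_rfl
  have := pvL_nonneg grid
  omega

lemma hrow_bound (grid : List (List Int)) (h : Pre_compute_quadrant_sum grid)
    (i : Int) (hi0 : 0 ≤ i) (hin : i < pvN grid) (hit : i ≠ pvT grid)
    (j : Int) (hj0 : 0 ≤ j) (hjm : j < pvM grid) (hjl : j ≠ pvL grid) :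
    j < ((PySem.List.pyGetD grid i []).length : Int) := by
  obtain ⟨hne, hpre⟩ := h
  have hT : pvT grid = ((grid.length / 2 : Nat) : Int) := by
    unfold pvT pvN; exact_mod_cast PySem.Int.floordiv_natCast grid.length 2
  have hM : pvM grid = ((grid.getD 0 []).length : Int) := by
    unfold pvM; rw [PySem.List.pyGetD_zero]
  have hL : pvL grid = (((grid.getD 0 []).length / 2 : Nat) : Int) := by
    unfold pvL; rw [hM]
    exact_mod_cast PySem.Int.floordiv_natCast (grid.getD 0 []).length 2
  have hgi : PySem.List.pyGetD grid i [] = grid.getD i.toNat [] := by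
    rw [show i = ((i.toNat : Nat) : Int) by omega, PySem.List.pyGetD_natCast]
    simp
    rw [show (max i 0).toNat = i.toNat by omega]
  rw [hgi]
  have hn' : i.toNat < grid.length := by unfold pvN at hin; omega
  have := hpre i.toNat hn' (by omega) j.toNat (by omega) (by omega)
  omega

lemma colLeft (grid : List (List Int)) (h : Pre_compute_quadrant_sum grid)
    (i : Int) (hi0 : 0 ≤ i) (hin : i < pvN grid) (hit : i ≠ pvT grid) :
    (PySem.List.slice (PySem.List.pyGetD grid i []) none (some (pvL grid))).sum
      = pvCol grid i 0 (pvL grid) := by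
  rw [PySem.List.slice_to _ (pvL_nonneg grid)]
  have hseg := seg (PySem.List.pyGetD grid i []) 0 0 (pvL grid) le_rfl
    (fun j hj0 hjl => hrow_bound grid h i hi0 hin hit j hj0
      (lt_of_lt_of_le hjl (pvL_le grid)) (by omega))
  simp only [Int.sub_zero] at hseg
  rw [show pvCol grid i 0 (pvL grid)
      = ((PySem.List.pyRange 0 (pvL grid) 1).map
          (fun j => PySem.List.pyGetD (PySem.List.pyGetD grid i []) j 0)).sum from rfl, hseg]
  simp

lemma colRight (grid : List (List Int)) (h : Pre_compute_quadrant_sum grid)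
    (i : Int) (hi0 : 0 ≤ i) (hin : i < pvN grid) (hit : i ≠ pvT grid) :
    (PySem.List.slice (PySem.List.pyGetD grid i []) (some (pvL grid + 1)) (some (pvM grid))).sum
      = pvCol grid i (pvL grid + 1) (pvM grid) := by
  have hl0 := pvL_nonneg grid
  have hm0 := pvM_nonneg grid
  rw [PySem.List.slice_toNat _ (by omega) hm0]
  have hseg := seg (PySem.List.pyGetD grid i []) 0 (pvL grid + 1) (pvM grid) (by omega)
    (fun j hj0 hjm => hrow_bound grid h i hi0 hin hit j (by omega) hjm (by omega))
  rw [show pvCol grid i (pvL grid + 1) (pvM grid)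
      = ((PySem.List.pyRange (pvL grid + 1) (pvM grid) 1).map
          (fun j => PySem.List.pyGetD (PySem.List.pyGetD grid i []) j 0)).sum from rfl, hseg]
  congr 2
  omega

lemma B_eq (grid : List (List Int)) (h : Pre_compute_quadrant_sum grid) :
    compute_quadrant_sum_alt grid
      = pvQuad grid 0 (pvT grid) 0 (pvL grid)
          * pvQuad grid 0 (pvT grid) (pvL grid + 1) (pvM grid)
          * pvQuad grid (pvT grid + 1) (pvN grid) 0 (pvL grid)
          * pvQuad grid (pvT grid + 1) (pvN grid) (pvL grid + 1) (pvM grid) := by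
  have hne := h.1
  have hN : pvN grid = (grid.length : Int) := rfl
  have ht0 : 0 ≤ pvT grid := pvT_nonneg grid
  have htn : pvT grid < pvN grid := pvT_lt grid hne
  have htop : PySem.List.slice grid none (some (pvT grid))
      = (PySem.List.pyRange 0 (pvT grid) 1).map (fun i => PySem.List.pyGetD grid i []) := by
    rw [PySem.List.slice_to _ ht0,
      seg grid [] 0 (pvT grid) le_rfl (fun j hj0 hjt => by omega)]
    simp
  have hbot : PySem.List.slice grid (some (pvT grid + 1)) none
      = (PySem.List.pyRange (pvT grid + 1) (pvN grid) 1).map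
          (fun i => PySem.List.pyGetD grid i []) := by
    rw [PySem.List.slice_from _ (by omega),
      seg grid [] (pvT grid + 1) (pvN grid) (by omega) (fun j hj0 hjn => by omega)]
    rw [List.take_of_length_le (by simp only [List.length_drop]; omega)]
  show ((PySem.List.slice grid none (some (pvT grid))).map
        (fun row => (PySem.List.slice row none (some (pvL grid))).sum)).sum
      * ((PySem.List.slice grid none (some (pvT grid))).map
        (fun row => (PySem.List.slice row (some (pvL grid + 1)) (some (pvM grid))).sum)).sum
      * ((PySem.List.slice grid (some (pvT grid + 1)) none).map
        (fun row => (PySem.List.slice row none (some (pvL grid))).sum)).sum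
      * ((PySem.List.slice grid (some (pvT grid + 1)) none).map
        (fun row => (PySem.List.slice row (some (pvL grid + 1)) (some (pvM grid))).sum)).sum
      = _
  rw [htop, hbot, List.map_map, List.map_map, List.map_map, List.map_map]
  have e1 : (PySem.List.pyRange 0 (pvT grid) 1).map
      ((fun row => (PySem.List.slice row none (some (pvL grid))).sum) ∘
        (fun i => PySem.List.pyGetD grid i []))
      = (PySem.List.pyRange 0 (pvT grid) 1).map (fun i => pvCol grid i 0 (pvL grid)) := by
    apply List.map_congr_left
    intro i hi
    obtain ⟨hi0, hit⟩ := PySem.List.mem_pyRange_one.mp hi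
    exact colLeft grid h i hi0 (by omega) (by omega)
  have e2 : (PySem.List.pyRange 0 (pvT grid) 1).map
      ((fun row => (PySem.List.slice row (some (pvL grid + 1)) (some (pvM grid))).sum) ∘
        (fun i => PySem.List.pyGetD grid i []))
      = (PySem.List.pyRange 0 (pvT grid) 1).map
          (fun i => pvCol grid i (pvL grid + 1) (pvM grid)) := by
    apply List.map_congr_left
    intro i hi
    obtain ⟨hi0, hit⟩ := PySem.List.mem_pyRange_one.mp hi
    exact colRight grid h i hi0 (by omega) (by omega)
  have e3 : (PySem.List.pyRange (pvT grid + 1) (pvN grid) 1).map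
      ((fun row => (PySem.List.slice row none (some (pvL grid))).sum) ∘
        (fun i => PySem.List.pyGetD grid i []))
      = (PySem.List.pyRange (pvT grid + 1) (pvN grid) 1).map
          (fun i => pvCol grid i 0 (pvL grid)) := by
    apply List.map_congr_left
    intro i hi
    obtain ⟨hi0, hit⟩ := PySem.List.mem_pyRange_one.mp hi
    exact colLeft grid h i (by omega) (by omega) (by omega)
  have e4 : (PySem.List.pyRange (pvT grid + 1) (pvN grid) 1).map
      ((fun row => (PySem.List.slice row (some (pvL grid + 1)) (some (pvM grid))).sum) ∘
        (fun i => PySem.List.pyGetD grid i []))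
      = (PySem.List.pyRange (pvT grid + 1) (pvN grid) 1).map
          (fun i => pvCol grid i (pvL grid + 1) (pvM grid)) := by
    apply List.map_congr_left
    intro i hi
    obtain ⟨hi0, hit⟩ := PySem.List.mem_pyRange_one.mp hi
    exact colRight grid h i (by omega) (by omega) (by omega)
  rw [e1, e2, e3, e4]
  rfl

lemma pv_main (grid : List (List Int)) (h : Pre_compute_quadrant_sum grid) :
    compute_quadrant_sum grid = compute_quadrant_sum_alt grid := by
  rw [A_eq grid h.1, B_eq grid h, one_mul]

-- ===== VERDICT (by name: the statement is the Claim_ definition above) =====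
theorem compute_quadrant_sum_spec : Claim_equal_compute_quadrant_sum := by
  intro grid _ hpre
  unfold Spec_compute_quadrant_sum
  exact pv_main grid hpre
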